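-- pv_equiv track=rewrite | github.com/Edgardosalas/INF_111 | Python/Laboratorios/Lab10 Cadenas/Cambiar la kesima palabra.py | elivocsbe
-- ===== SOURCE A (Python) =====
-- def esvocalsbe(wsbe):
--     ksbe=0
--     if wsbe=="a" or wsbe=="e" or wsbe=="i" or wsbe=="o" or wsbe=="u":
--         ksbe=1
--     return ksbe
--
-- def elivocsbe(wsbe,ksbe):
--     csbe=0; vsbe=""
--     elesbe=len(wsbe)
--     for isbe in range(1, elesbe+1):
--         ysbe=wsbe[isbe-1:isbe]
--         if esvocalsbe(ysbe)==1:
--             csbe=csbe+1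
--             if csbe==ksbe:
--                 ysbe=""
--         vsbe=vsbe+ysbe
--     return vsbe
-- ===== SOURCE B (Python) =====
-- def elivocsbe(wsbe, ksbe):
--     # Locate the ksbe-th lowercase vowel, then remove it with one slice.
--     cnt = 0
--     for i, ch in enumerate(wsbe):
--         if ch in "aeiou":
--             cnt += 1
--             if cnt == ksbe:
--                 return wsbe[:i] + wsbe[i+1:]
--     return wsbe
-- ===== Notes on version B (the rewrite author's own statement) =====
-- stated objective: simpler
-- what changed: B finds the index of the k-th vowel with an early-exit scan and removes it with a single slice, instead of rebuilding the whole string character by character via one-character slices and a helper that tests vowelhood by string equality.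
import Mathlib
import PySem

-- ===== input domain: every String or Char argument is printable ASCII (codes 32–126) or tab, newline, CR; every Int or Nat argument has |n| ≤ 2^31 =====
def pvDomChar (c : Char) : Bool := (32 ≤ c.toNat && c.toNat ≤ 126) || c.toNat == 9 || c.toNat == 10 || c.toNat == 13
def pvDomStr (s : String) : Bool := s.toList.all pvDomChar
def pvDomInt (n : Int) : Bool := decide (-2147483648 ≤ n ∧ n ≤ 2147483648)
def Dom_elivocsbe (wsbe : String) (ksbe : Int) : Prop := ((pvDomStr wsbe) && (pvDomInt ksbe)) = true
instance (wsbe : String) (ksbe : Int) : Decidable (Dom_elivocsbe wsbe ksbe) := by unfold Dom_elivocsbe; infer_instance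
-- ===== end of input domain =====

-- B locates the k-th lowercase vowel with an early-exit scan and removes it with one slice,
-- instead of rebuilding the string character by character (objective: simpler).


-- ===== PORT A =====
-- esvocalsbe(wsbe): 1 if the (one-char) string is a lowercase vowel, else 0
def esvocalsbePort (wsbe : List Char) : Int :=
  if wsbe = ['a'] ∨ wsbe = ['e'] ∨ wsbe = ['i'] ∨ wsbe = ['o'] ∨ wsbe = ['u'] then 1 else 0

def elivocsbe (wsbe : String) (ksbe : Int) : String :=
  let l := wsbe.toList
  let st := (PySem.List.pyRange 1 ((l.length : Int) + 1) 1).foldl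
    (fun (st : Int × List Char) isbe =>
      let ysbe := PySem.List.slice l (some (isbe - 1)) (some isbe)
      if esvocalsbePort ysbe = 1 then
        let csbe := st.1 + 1
        (csbe, st.2 ++ (if csbe = ksbe then [] else ysbe))
      else
        (st.1, st.2 ++ ysbe))
    ((0 : Int), ([] : List Char))
  String.ofList st.2

-- ===== PORT B =====
def isVowelB (c : Char) : Bool := ['a', 'e', 'i', 'o', 'u'].contains c

-- the early-exit enumerate loop of Source B: index of the k-th vowel, counting from cnt, positions from i
def findVowelIdx (l : List Char) (k cnt : Int) (i : Nat) : Option Nat :=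
  match l with
  | [] => none
  | c :: rest =>
    if isVowelB c then
      if cnt + 1 = k then some i else findVowelIdx rest k (cnt + 1) (i + 1)
    else findVowelIdx rest k cnt (i + 1)

def elivocsbe_alt (wsbe : String) (ksbe : Int) : String :=
  let l := wsbe.toList
  match findVowelIdx l ksbe 0 0 with
  | some i => String.ofList (l.take i ++ l.drop (i + 1))
  | none => wsbe

-- ===== PRECONDITION & SPEC =====
def Spec_elivocsbe (wsbe : String) (ksbe : Int) (out : String) : Prop := out = elivocsbe_alt wsbe ksbe
instance (wsbe : String) (ksbe : Int) (out : String) : Decidable (Spec_elivocsbe wsbe ksbe out) := by unfold Spec_elivocsbe; infer_instance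

-- ===== CLAIM (what is proved, stated in full; the proofs are below) =====
def Claim_equal_elivocsbe : Prop := ∀ (wsbe : String) (ksbe : Int), Dom_elivocsbe wsbe ksbe → Spec_elivocsbe wsbe ksbe (elivocsbe wsbe ksbe)

-- ===== LEMMAS AND PROOFS =====

-- A's loop body after the one-character slices are exposed (proof-only helper)
def abody (k : Int) (st : Int × List Char) (c : Char) : Int × List Char :=
  if isVowelB c then (st.1 + 1, st.2 ++ (if st.1 + 1 = k then [] else [c]))
  else (st.1, st.2 ++ [c])

-- esvocalsbe on a singleton string is exactly the vowel test
theorem esvocalsbe_singleton (c : Char) :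
    esvocalsbePort [c] = if isVowelB c then 1 else 0 := by
  simp only [esvocalsbePort, isVowelB, List.cons.injEq, and_true, List.contains_eq_mem]
  by_cases ha : c = 'a' <;> by_cases he : c = 'e' <;> by_cases hi : c = 'i' <;>
    by_cases ho : c = 'o' <;> by_cases hu : c = 'u' <;> simp [ha, he, hi, ho, hu]

-- A's slices wsbe[i-1:i] for i in range(1, len+1) are exactly the singleton characters
theorem slices_eq (l : List Char) :
    (PySem.List.pyRange 1 ((l.length : Int) + 1) 1).map
      (fun i => PySem.List.slice l (some (i - 1)) (some i)) = l.map (fun c => [c]) := by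
  apply List.ext_getElem
  · simp [PySem.List.length_pyRange_one]
  · intro j h1 h2
    simp only [List.getElem_map, PySem.List.getElem_pyRange_one]
    have hj : j < l.length := by
      have := h1; simp [PySem.List.length_pyRange_one] at this; omega
    have h1j : (1 : Int) + j - 1 = (j : Nat) := by omega
    have h2j : (1 : Int) + j = ((j + 1 : Nat) : Int) := by omega
    rw [h1j, h2j, PySem.List.slice_natCast]
    simp [List.take_one_drop_eq_of_lt_length hj]

-- the slices exposed, as a reusable fold identity
theorem foldl_slices (l : List Char) (F : (Int × List Char) → List Char → (Int × List Char))
    (init : Int × List Char) :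
    (PySem.List.pyRange 1 ((l.length : Int) + 1) 1).foldl
      (fun st i => F st (PySem.List.slice l (some (i - 1)) (some i))) init
    = l.foldl (fun st c => F st [c]) init := by
  have e1 : ((PySem.List.pyRange 1 ((l.length : Int) + 1) 1).map
      (fun i => PySem.List.slice l (some (i - 1)) (some i))).foldl F init
      = (PySem.List.pyRange 1 ((l.length : Int) + 1) 1).foldl
        (fun st i => F st (PySem.List.slice l (some (i - 1)) (some i))) init := by
    rw [List.foldl_map]
  have e2 : (l.map (fun c => [c])).foldl F init = l.foldl (fun st c => F st [c]) init := by
    rw [List.foldl_map]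
  rw [← e1, slices_eq l, e2]

-- once the counter has reached k, A's loop only copies the remaining characters
theorem abody_copy (k : Int) (l : List Char) :
    ∀ (cnt : Int) (acc : List Char), k ≤ cnt →
      (l.foldl (abody k) (cnt, acc)).2 = acc ++ l := by
  induction l with
  | nil => intro cnt acc _; simp
  | cons c rest ih =>
    intro cnt acc hk
    simp only [List.foldl_cons, abody]
    by_cases hv : isVowelB c
    · rw [if_pos hv, if_neg (show ¬ (cnt + 1 = k) by omega)]
      rw [ih (cnt + 1) (acc ++ [c]) (by omega)]; simp
    · rw [if_neg hv]
      rw [ih cnt (acc ++ [c]) hk]; simp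

-- the found index is at least the starting position
theorem findVowelIdx_ge (l : List Char) :
    ∀ (k cnt : Int) (i j : Nat), findVowelIdx l k cnt i = some j → i ≤ j := by
  induction l with
  | nil => intro k cnt i j h; simp [findVowelIdx] at h
  | cons c rest ih =>
    intro k cnt i j h
    simp only [findVowelIdx] at h
    by_cases hv : isVowelB c
    · rw [if_pos hv] at h
      by_cases he : cnt + 1 = k
      · rw [if_pos he] at h; simp only [Option.some.injEq] at h; omega
      · rw [if_neg he] at h; have := ih k (cnt + 1) (i + 1) j h; omega
    · rw [if_neg hv] at h; have := ih k cnt (i + 1) j h; omega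

-- main invariant: A's loop equals "remove at the index B finds"
theorem main_inv (k : Int) (l : List Char) :
    ∀ (cnt : Int) (acc : List Char) (i : Nat),
      (l.foldl (abody k) (cnt, acc)).2 =
        acc ++ (match findVowelIdx l k cnt i with
                | some j => l.take (j - i) ++ l.drop (j - i + 1)
                | none => l) := by
  induction l with
  | nil => intro cnt acc i; simp [findVowelIdx]
  | cons c rest ih =>
    intro cnt acc i
    rw [List.foldl_cons]
    by_cases hv : isVowelB c
    · by_cases he : cnt + 1 = k
      · have hb : abody k (cnt, acc) c = (cnt + 1, acc) := by simp [abody, hv, he]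
        have hf : findVowelIdx (c :: rest) k cnt i = some i := by simp [findVowelIdx, hv, he]
        rw [hb, hf, abody_copy k rest (cnt + 1) acc (by omega)]
        simp
      · have hb : abody k (cnt, acc) c = (cnt + 1, acc ++ [c]) := by simp [abody, hv, he]
        have hf : findVowelIdx (c :: rest) k cnt i = findVowelIdx rest k (cnt + 1) (i + 1) := by
          simp [findVowelIdx, hv, he]
        rw [hb, hf, ih (cnt + 1) (acc ++ [c]) (i + 1)]
        cases hfd : findVowelIdx rest k (cnt + 1) (i + 1) with
        | none => simp
        | some j =>
          have hge := findVowelIdx_ge rest k (cnt + 1) (i + 1) j hfd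
          have h1 : j - i = (j - (i + 1)) + 1 := by omega
          simp [h1]
    · have hb : abody k (cnt, acc) c = (cnt, acc ++ [c]) := by simp [abody, hv]
      have hf : findVowelIdx (c :: rest) k cnt i = findVowelIdx rest k cnt (i + 1) := by
        simp [findVowelIdx, hv]
      rw [hb, hf, ih cnt (acc ++ [c]) (i + 1)]
      cases hfd : findVowelIdx rest k cnt (i + 1) with
      | none => simp
      | some j =>
        have hge := findVowelIdx_ge rest k cnt (i + 1) j hfd
        have h1 : j - i = (j - (i + 1)) + 1 := by omega
        simp [h1]

-- ===== VERDICT (by name: the statement is the Claim_ definition above) =====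
theorem elivocsbe_spec : Claim_equal_elivocsbe := by
  intro wsbe ksbe _
  unfold Spec_elivocsbe elivocsbe elivocsbe_alt
  set l := wsbe.toList with hl
  have hfold :
      (PySem.List.pyRange 1 ((l.length : Int) + 1) 1).foldl
        (fun (st : Int × List Char) isbe =>
          let ysbe := PySem.List.slice l (some (isbe - 1)) (some isbe)
          if esvocalsbePort ysbe = 1 then
            let csbe := st.1 + 1
            (csbe, st.2 ++ (if csbe = ksbe then [] else ysbe))
          else
            (st.1, st.2 ++ ysbe)) ((0 : Int), ([] : List Char))
      = l.foldl (abody ksbe) ((0 : Int), ([] : List Char)) := by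
    rw [foldl_slices l (fun st ysbe =>
      if esvocalsbePort ysbe = 1 then
        (st.1 + 1, st.2 ++ (if st.1 + 1 = ksbe then [] else ysbe))
      else (st.1, st.2 ++ ysbe))]
    have hfun : (fun (st : Int × List Char) (c : Char) =>
        if esvocalsbePort [c] = 1 then
          (st.1 + 1, st.2 ++ (if st.1 + 1 = ksbe then [] else [c]))
        else (st.1, st.2 ++ [c])) = abody ksbe := by
      funext st c
      simp only [esvocalsbe_singleton, abody]
      by_cases hv : isVowelB c <;> simp [hv]
    rw [hfun]
  simp only [hfold]
  rw [main_inv ksbe l 0 [] 0]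
  cases hfd : findVowelIdx l ksbe 0 0 with
  | none => simp [hl]
  | some j => simp
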